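-- pv_equiv track=rewrite | github.com/baptmnt/weather-prophet | finetune.py | parse_excluded_from_model_name
-- ===== SOURCE A (Python) =====
-- from typing import Dict, List, Optional, Tuple
--
-- ALL_VARS = ['dd', 'ff', 'precip', 'hu', 'td', 't', 'psl']
--
-- def parse_excluded_from_model_name(model_name: str) -> List[str]:
--     """
--     Extrait les variables exclues depuis le nom (tokens finaux parmi ALL_VARS).
--     Ex: "...-precip-dd" -> ["precip","dd"]
--     """
--     if not model_name:
--         return []
--     parts = model_name.split('-')
--     excluded: List[str] = []
--     # parcourir de la fin vers le début jusqu'à tomber sur un token non variable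
--     for part in reversed(parts):
--         low = part.lower()
--         if low in ALL_VARS:
--             excluded.append(low)
--         else:
--             # Stop dès qu'on ne voit plus de variables
--             if excluded:
--                 break
--     return list(reversed(excluded))
-- ===== SOURCE B (Python) =====
-- from typing import List
--
-- ALL_VARS = ['dd', 'ff', 'precip', 'hu', 'td', 't', 'psl']
--
-- def parse_excluded_from_model_name(model_name: str) -> List[str]:
--     """Forward single pass: keep the current run of variable tokens and the
--     last completed run; the answer is the run containing the last variable."""
--     if not model_name:
--         return []
--     best: List[str] = []
--     cur: List[str] = []
--     for part in model_name.split('-'):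
--         low = part.lower()
--         if low in ALL_VARS:
--             cur.append(low)
--         else:
--             if cur:
--                 best = cur
--             cur = []
--     return cur if cur else best
-- ===== Notes on version B (the rewrite author's own statement) =====
-- stated objective: alternative
-- what changed: Replaces A's backward scan with break over reversed(parts) by a single forward fold that maintains the current run of variable tokens and the last completed run, returning the run containing the last variable.
import Mathlib
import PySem

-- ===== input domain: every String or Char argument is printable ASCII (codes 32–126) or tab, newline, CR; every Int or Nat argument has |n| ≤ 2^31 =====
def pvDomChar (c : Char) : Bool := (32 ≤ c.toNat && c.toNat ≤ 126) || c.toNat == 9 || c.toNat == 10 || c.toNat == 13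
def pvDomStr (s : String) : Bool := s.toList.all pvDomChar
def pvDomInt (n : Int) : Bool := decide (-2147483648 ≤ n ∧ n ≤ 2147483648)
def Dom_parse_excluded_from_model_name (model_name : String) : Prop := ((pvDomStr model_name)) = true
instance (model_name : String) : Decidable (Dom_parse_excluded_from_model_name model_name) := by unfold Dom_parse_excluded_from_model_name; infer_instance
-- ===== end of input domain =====

-- B: same task by a single forward fold (current run + last completed run) instead of A's backward scan with break; same O(n) cost.
-- ===== PORT A =====
def pvALL_VARS : List String := ["dd", "ff", "precip", "hu", "td", "t", "psl"]

-- the `for part in reversed(parts)` loop with `break`: returns `excluded` at the break / end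
def pvLoopA : List String → List String → List String
  | [], excluded => excluded
  | part :: rest, excluded =>
    let low := PySem.Str.lower part
    if low ∈ pvALL_VARS then pvLoopA rest (excluded ++ [low])
    else if excluded ≠ [] then excluded
    else pvLoopA rest excluded

def parse_excluded_from_model_name (model_name : String) : List String :=
  if model_name = "" then []
  else
    -- sep is the literal "-", never empty, so split? is always `some`
    let parts := (PySem.Str.split? model_name "-").getD []
    (pvLoopA parts.reverse []).reverse

-- ===== PORT B =====
-- loop body of B: state = (best, cur)
def pvStepB (s : List String × List String) (part : String) : List String × List String :=
  let low := PySem.Str.lower part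
  if low ∈ pvALL_VARS then (s.1, s.2 ++ [low])
  else if s.2 ≠ [] then (s.2, [])
  else (s.1, [])

def parse_excluded_from_model_name_alt (model_name : String) : List String :=
  if model_name = "" then []
  else
    -- sep is the literal "-", never empty, so split? is always `some`
    let s := ((PySem.Str.split? model_name "-").getD []).foldl pvStepB ([], [])
    if s.2 ≠ [] then s.2 else s.1

-- ===== PRECONDITION & SPEC =====
def Spec_parse_excluded_from_model_name (model_name : String) (out : List String) : Prop := out = parse_excluded_from_model_name_alt model_name
instance (model_name : String) (out : List String) : Decidable (Spec_parse_excluded_from_model_name model_name out) := by unfold Spec_parse_excluded_from_model_name; infer_instance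

-- ===== CLAIM (what is proved, stated in full; the proofs are below) =====
def Claim_equal_parse_excluded_from_model_name : Prop := ∀ (model_name : String), Dom_parse_excluded_from_model_name model_name → Spec_parse_excluded_from_model_name model_name (parse_excluded_from_model_name model_name)

-- ===== LEMMAS AND PROOFS =====

-- ===== VERDICT (by name: the statement is the Claim_ definition above) =====
-- v : is this (already lowered) token a variable name?
def pvV (x : String) : Bool := decide (x ∈ pvALL_VARS)

-- pure versions of the two loops over the pre-lowered token list
def pvPureLoopA : List String → List String → List String
  | [], excluded => excluded
  | low :: rest, excluded =>
    if pvV low then pvPureLoopA rest (excluded ++ [low])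
    else if excluded ≠ [] then excluded
    else pvPureLoopA rest excluded

def pvPureStepB (s : List String × List String) (low : String) : List String × List String :=
  if pvV low then (s.1, s.2 ++ [low])
  else if s.2 ≠ [] then (s.2, [])
  else (s.1, [])

lemma pvLoopA_eq_pure (M : List String) (acc : List String) :
    pvLoopA M acc = pvPureLoopA (M.map PySem.Str.lower) acc := by
  induction M generalizing acc with
  | nil => rfl
  | cons h t ih =>
    simp only [pvLoopA, pvPureLoopA, List.map, pvV, decide_eq_true_eq]
    split_ifs <;> simp_all

lemma pvStepB_eq_pure (L : List String) (s : List String × List String) :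
    L.foldl pvStepB s = (L.map PySem.Str.lower).foldl pvPureStepB s := by
  rw [List.foldl_map]
  have h : pvStepB = fun s a => pvPureStepB s (PySem.Str.lower a) := by
    funext s a
    simp only [pvStepB, pvPureStepB, pvV, decide_eq_true_eq]
  rw [h]

lemma pvPureLoopA_ne_nil (M acc : List String) (h : acc ≠ []) :
    pvPureLoopA M acc = acc ++ M.takeWhile pvV := by
  induction M generalizing acc with
  | nil => simp [pvPureLoopA]
  | cons x t ih =>
    simp only [pvPureLoopA, List.takeWhile]
    cases hv : pvV x with
    | true => simp [ih (acc ++ [x]) (by simp)]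
    | false => simp [h]

lemma pvPureLoopA_nil (M : List String) :
    pvPureLoopA M [] = (M.dropWhile (fun x => ! pvV x)).takeWhile pvV := by
  induction M with
  | nil => rfl
  | cons x t ih =>
    simp only [pvPureLoopA, List.dropWhile]
    cases hv : pvV x with
    | true => simp [hv, pvPureLoopA_ne_nil t [x] (by simp)]
    | false => simp [ih]

-- the two components of B's fold state, characterised from the back of the list
def pvCur (L : List String) : List String := (L.reverse.takeWhile pvV).reverse
def pvBest (L : List String) : List String :=
  (((L.reverse.dropWhile pvV).dropWhile (fun x => ! pvV x)).takeWhile pvV).reverse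

lemma pvFoldB_char (L : List String) :
    L.foldl pvPureStepB ([], []) = (pvBest L, pvCur L) := by
  induction L using List.reverseRecOn with
  | nil => rfl
  | append_singleton t x ih =>
    rw [List.foldl_append, ih]
    simp only [List.foldl, pvPureStepB, pvCur, pvBest, List.reverse_append,
      List.reverse_singleton, List.singleton_append]
    cases hv : pvV x with
    | true => simp [List.takeWhile, List.dropWhile, hv]
    | false =>
      by_cases hc : (t.reverse.takeWhile pvV).reverse = []
      · have ht : t.reverse.takeWhile pvV = [] := by
          simpa using congrArg List.reverse hc
        have hd : t.reverse.dropWhile pvV = t.reverse := by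
          cases hrev : t.reverse with
          | nil => simp
          | cons y ys =>
            rw [hrev] at ht
            simp only [List.takeWhile] at ht
            cases hy : pvV y with
            | true => simp [hy] at ht
            | false => simp [List.dropWhile, hy]
        simp [hv, List.takeWhile, List.dropWhile, hd, ht]
      · have ht : t.reverse.takeWhile pvV ≠ [] := fun h => hc (by simp [h])
        obtain ⟨y, ys, hrev, hy⟩ : ∃ y ys, t.reverse = y :: ys ∧ pvV y = true := by
          cases hrev : t.reverse with
          | nil => rw [hrev] at ht; simp at ht
          | cons y ys =>
            refine ⟨y, ys, rfl, ?_⟩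
            rw [hrev] at ht
            by_contra hyf
            simp [List.takeWhile, Bool.of_not_eq_true hyf] at ht
        simp [hv, List.takeWhile, List.dropWhile, hrev, hy]

-- the list-level heart: A's backward scan equals B's forward fold on any token list
lemma pvMain (parts : List String) :
    (pvLoopA parts.reverse []).reverse =
      (if ((parts.foldl pvStepB ([], [])).2 ≠ []) then (parts.foldl pvStepB ([], [])).2
       else (parts.foldl pvStepB ([], [])).1) := by
  rw [pvLoopA_eq_pure, pvStepB_eq_pure, pvFoldB_char, pvPureLoopA_nil]
  rw [show (parts.reverse.map PySem.Str.lower) = (parts.map PySem.Str.lower).reverse from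
    List.map_reverse]
  set L := parts.map PySem.Str.lower with hL
  by_cases hc : pvCur L = []
  · have ht : L.reverse.takeWhile pvV = [] := by
      simpa [pvCur] using congrArg List.reverse hc
    have hd : L.reverse.dropWhile pvV = L.reverse := by
      cases hrev : L.reverse with
      | nil => simp
      | cons y ys =>
        rw [hrev] at ht
        simp only [List.takeWhile] at ht
        cases hy : pvV y with
        | true => simp [hy] at ht
        | false => simp [List.dropWhile, hy]
    simp [hc, pvBest, hd]
  · have ht : L.reverse.takeWhile pvV ≠ [] := by
      intro h; exact hc (by simp [pvCur, h])
    obtain ⟨y, ys, hrev, hy⟩ : ∃ y ys, L.reverse = y :: ys ∧ pvV y = true := by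
      cases hrev : L.reverse with
      | nil => rw [hrev] at ht; simp at ht
      | cons y ys =>
        refine ⟨y, ys, rfl, ?_⟩
        rw [hrev] at ht
        by_contra hyf
        simp [List.takeWhile, Bool.of_not_eq_true hyf] at ht
    simp [pvCur, hrev, hy]

-- ===== VERDICT (by name: the statement is the Claim_ definition above) =====
theorem parse_excluded_from_model_name_spec : Claim_equal_parse_excluded_from_model_name := by
  intro model_name _
  unfold Spec_parse_excluded_from_model_name
  unfold parse_excluded_from_model_name parse_excluded_from_model_name_alt
  by_cases h : model_name = ""
  · simp [h]
  · simp only [h, if_false]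
    exact pvMain _
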